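-- pv_equiv track=rewrite | github.com/hongminpark/prgrms | stack_queue/lv2_기능개발.py | solution
-- ===== SOURCE A (Python) =====
-- import math
--
-- def solution(progresses, speeds):
--     deploys = [math.ceil((100-p)/s) for p, s in zip(progresses, speeds)]
--     days = [deploys[0]]
--     counts = []
--     for d in deploys[1:]:
--         if d <= days[0]:
--             days.append(d)
--         else:
--             counts.append(len(days))
--             days = [d]
--     counts.append(len(days))
--     return counts
-- ===== SOURCE B (Python) =====
-- import math
--
-- def solution(progresses, speeds):
--     deploys = [math.ceil((100 - p) / s) for p, s in zip(progresses, speeds)]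
--     # stage 1: running prefix maximum of the deploy days
--     peaks = []
--     for d in deploys:
--         peaks.append(d if not peaks or d > peaks[-1] else peaks[-1])
--     # stage 2: run-length encode the prefix-max sequence; each run is one release
--     counts = []
--     prev = None
--     for v in peaks:
--         if v == prev:
--             counts[-1] += 1
--         else:
--             counts.append(1)
--         prev = v
--     return counts
-- ===== Notes on version B (the rewrite author's own statement) =====
-- stated objective: alternative
-- what changed: B computes the prefix-maximum sequence of the deploy days and run-length encodes it (a feature releases with the latest earlier feature, so releases are runs of equal prefix maxima), instead of grouping by comparing each deploy day to the current group's first element.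
import Mathlib
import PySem

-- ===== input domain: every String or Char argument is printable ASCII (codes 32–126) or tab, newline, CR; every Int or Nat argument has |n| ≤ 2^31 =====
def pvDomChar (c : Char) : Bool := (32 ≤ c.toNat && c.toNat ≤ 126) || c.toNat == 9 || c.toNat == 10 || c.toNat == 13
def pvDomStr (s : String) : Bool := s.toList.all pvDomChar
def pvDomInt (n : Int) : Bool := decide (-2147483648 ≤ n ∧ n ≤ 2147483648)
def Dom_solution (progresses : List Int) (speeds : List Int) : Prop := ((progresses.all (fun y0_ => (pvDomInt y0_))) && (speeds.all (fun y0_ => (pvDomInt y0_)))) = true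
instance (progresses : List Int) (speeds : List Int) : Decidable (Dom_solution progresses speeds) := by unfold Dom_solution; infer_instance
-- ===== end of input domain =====

-- B replaces A's group-by-current-head pass with a different algorithm: it takes
-- the prefix-maximum sequence of the deploy days and run-length encodes it
-- (releases are exactly the runs of equal prefix maxima). Same cost.

-- ===== PORT A =====
-- math.ceil((100-p)/s): on Dom (|values| ≤ 2^31 ≪ 2^53) the correctly rounded
-- float quotient never crosses an integer, so it equals the exact rational
-- ceil = -((p-100) // s).
def solution (progresses : List Int) (speeds : List Int) : List Int :=
  let deploys := (List.zip progresses speeds).map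
    (fun ps => -(PySem.Int.floordiv (ps.1 - 100) ps.2))
  match deploys with
  | [] => []  -- unreachable under Pre_solution: Python raises IndexError on deploys[0]
  | d0 :: rest =>
    -- days[0] is total because days is never empty; headD 0 transcribes it.
    let st := rest.foldl
      (fun (st : List Int × List Int) d =>
        if d ≤ st.1.headD 0 then (st.1 ++ [d], st.2)
        else ([d], st.2 ++ [(st.1.length : Int)]))
      ([d0], [])
    st.2 ++ [(st.1.length : Int)]

-- ===== PORT B =====
def solution_alt (progresses : List Int) (speeds : List Int) : List Int :=
  let deploys := (List.zip progresses speeds).map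
    (fun ps => -(PySem.Int.floordiv (ps.1 - 100) ps.2))
  -- peaks.append(d if not peaks or d > peaks[-1] else peaks[-1])
  let peaks := deploys.foldl
    (fun (pk : List Int) d =>
      pk ++ [if pk = [] then d else if d > pk.getLastD 0 then d else pk.getLastD 0])
    []
  -- run-length encode peaks; prev : Option Int starts as None, counts[-1] += 1
  let st := peaks.foldl
    (fun (st : List Int × Option Int) v =>
      if some v = st.2 then (st.1.dropLast ++ [st.1.getLastD 0 + 1], st.2)
      else (st.1 ++ [1], some v))
    ([], none)
  st.1

-- ===== PRECONDITION & SPEC =====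
-- Pre_ excludes exactly where A raises: empty zip (IndexError on deploys[0]) and a
-- zero speed among the zipped pairs (ZeroDivisionError).
def Pre_solution (progresses : List Int) (speeds : List Int) : Prop :=
  progresses ≠ [] ∧ speeds ≠ [] ∧ ∀ x ∈ List.zip progresses speeds, x.2 ≠ 0
instance (progresses : List Int) (speeds : List Int) : Decidable (Pre_solution progresses speeds) := by unfold Pre_solution; infer_instance
def pvWitness_solution : List Int × List Int := ([30, 30, 95], [2, 1, 1])

def Spec_solution (progresses : List Int) (speeds : List Int) (out : List Int) : Prop := out = solution_alt progresses speeds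
instance (progresses : List Int) (speeds : List Int) (out : List Int) : Decidable (Spec_solution progresses speeds out) := by unfold Spec_solution; infer_instance

-- ===== CLAIM (what is proved, stated in full; the proofs are below) =====
def Claim_equal_solution : Prop := ∀ (progresses : List Int) (speeds : List Int), Dom_solution progresses speeds → Pre_solution progresses speeds → Spec_solution progresses speeds (solution progresses speeds)

-- ===== LEMMAS AND PROOFS =====

-- common reference: group sizes, carrying the current group's head h and size c
def pvGrp (h c : Int) : List Int → List Int
  | [] => [c]
  | d :: ds => if d ≤ h then pvGrp h (c + 1) ds else c :: pvGrp d 1 ds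

def pvFoldA (st : List Int × List Int) (d : Int) : List Int × List Int :=
  if d ≤ st.1.headD 0 then (st.1 ++ [d], st.2)
  else ([d], st.2 ++ [(st.1.length : Int)])

-- prefix maxima after the first element
def pvPM (h : Int) : List Int → List Int
  | [] => []
  | d :: ds => max h d :: pvPM (max h d) ds

def pvFoldP (pk : List Int) (d : Int) : List Int :=
  pk ++ [if pk = [] then d else if d > pk.getLastD 0 then d else pk.getLastD 0]

def pvFoldC (st : List Int × Option Int) (v : Int) : List Int × Option Int :=
  if some v = st.2 then (st.1.dropLast ++ [st.1.getLastD 0 + 1], st.2)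
  else (st.1 ++ [1], some v)

theorem pvLemA (rest : List Int) (counts days : List Int) (h : Int)
    (hd : days.headD 0 = h) (hne : days ≠ []) :
    (let st := rest.foldl pvFoldA (days, counts); st.2 ++ [(st.1.length : Int)])
      = counts ++ pvGrp h (days.length : Int) rest := by
  induction rest generalizing counts days h with
  | nil => simp [pvGrp]
  | cons d rest ih =>
    simp only [List.foldl_cons, pvFoldA, hd, pvGrp]
    by_cases hle : d ≤ h
    · simp only [if_pos hle]
      have := ih counts (days ++ [d]) h (by cases days <;> simp_all) (by simp)
      rw [this]
      have harg : (((days ++ [d]).length : Nat) : Int) = (days.length : Int) + 1 := by simp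
      rw [harg]
    · simp only [if_neg hle]
      have := ih (counts ++ [(days.length : Int)]) [d] d rfl (by simp)
      simp only [List.length_cons, List.length_nil] at this
      rw [this, List.append_assoc]
      norm_num

-- the peaks fold extends a nonempty prefix with the prefix maxima of the rest
theorem pvLemP (rest : List Int) (pk : List Int) (h : Int)
    (hne : pk ≠ []) (hl : pk.getLastD 0 = h) :
    rest.foldl pvFoldP pk = pk ++ pvPM h rest := by
  induction rest generalizing pk h with
  | nil => simp [pvPM]
  | cons d rest ih =>
    simp only [List.foldl_cons, pvFoldP, if_neg hne, hl, pvPM]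
    by_cases hgt : d > h
    · have hm : max h d = d := max_eq_right (le_of_lt hgt)
      rw [if_pos hgt, ih (pk ++ [d]) d (by simp) (by simp), hm, List.append_assoc]
      rfl
    · have hm : max h d = h := max_eq_left (not_lt.mp hgt)
      rw [if_neg hgt, ih (pk ++ [h]) h (by simp) (by simp), hm, List.append_assoc]
      rfl

-- run-length encoding of the prefix-max tail produces the group sizes
theorem pvLemC (rest : List Int) (counts : List Int) (h c : Int) :
    ((pvPM h rest).foldl pvFoldC (counts ++ [c], some h)).1 = counts ++ pvGrp h c rest := by
  induction rest generalizing counts h c with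
  | nil => simp [pvPM, pvGrp]
  | cons d rest ih =>
    simp only [pvPM, List.foldl_cons, pvFoldC, pvGrp]
    by_cases hle : d ≤ h
    · have hm : max h d = h := max_eq_left hle
      simp only [hm, if_pos hle, List.dropLast_concat, List.getLastD_concat]
      exact ih counts h (c + 1)
    · have hgt : h < d := not_le.mp hle
      have hm : max h d = d := max_eq_right (le_of_lt hgt)
      have hne : ¬ (some d = some h) := by simp; omega
      simp only [hm, if_neg hne, if_neg hle]
      have := ih (counts ++ [c]) d 1
      simpa [List.append_assoc] using this

-- ===== VERDICT (by name: the statement is the Claim_ definition above) =====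
theorem solution_spec : Claim_equal_solution := by
  intro progresses speeds _ _
  unfold Spec_solution solution solution_alt
  simp only []
  set deploys := (List.zip progresses speeds).map
    (fun ps => -(PySem.Int.floordiv (ps.1 - 100) ps.2)) with hdep
  cases deploys with
  | nil => rfl
  | cons d0 rest =>
    show (let st := rest.foldl pvFoldA ([d0], []); st.2 ++ [(st.1.length : Int)]) = _
    have hA := pvLemA rest [] [d0] d0 rfl (by simp)
    simp only [List.length_cons, List.length_nil, List.nil_append] at hA
    rw [hA]
    show _ = (((d0 :: rest).foldl pvFoldP []).foldl pvFoldC ([], none)).1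
    have hP : (d0 :: rest).foldl pvFoldP [] = [d0] ++ pvPM d0 rest := by
      rw [List.foldl_cons]
      exact pvLemP rest (pvFoldP [] d0) d0 (by simp [pvFoldP]) (by simp [pvFoldP])
    rw [hP]
    have hC1 : pvFoldC ([], none) d0 = ([] ++ [(1 : Int)], some d0) := by
      simp [pvFoldC]
    rw [List.foldl_append, List.foldl_cons, List.foldl_nil, hC1, pvLemC]
    simp
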